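-- pv_equiv track=rewrite | github.com/MaximilianV/fb_reactions_crawler | crawlpagepreferences.py | build_category_vector
-- ===== SOURCE A (Python) =====
-- def build_category_vector(cats):
-- 	h = dict()
-- 	i = 0
-- 	for cat in cats:
-- 		if not cat in h:
-- 			h[cat] = i
-- 			i += 1
-- 	return h
-- ===== SOURCE B (Python) =====
-- def build_category_vector(cats):
--     # Different algorithm: record each category's FIRST position with a single
--     # backward overwrite pass (no membership test), then rank the categories by
--     # sorting on that position and assign ranks.
--     first_pos = {}
--     for i, c in reversed(list(enumerate(cats))):
--         first_pos[c] = i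
--     order = sorted(first_pos, key=first_pos.get)
--     return {c: i for i, c in enumerate(order)}
-- ===== Notes on version B (the rewrite author's own statement) =====
-- stated objective: alternative
-- what changed: Replaced A's single guarded pass with a running counter by a different algorithm: a backward overwrite pass records each category's first position, then the categories are ranked by sorting on that position and the result dict is built from the ranks.
import Mathlib
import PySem

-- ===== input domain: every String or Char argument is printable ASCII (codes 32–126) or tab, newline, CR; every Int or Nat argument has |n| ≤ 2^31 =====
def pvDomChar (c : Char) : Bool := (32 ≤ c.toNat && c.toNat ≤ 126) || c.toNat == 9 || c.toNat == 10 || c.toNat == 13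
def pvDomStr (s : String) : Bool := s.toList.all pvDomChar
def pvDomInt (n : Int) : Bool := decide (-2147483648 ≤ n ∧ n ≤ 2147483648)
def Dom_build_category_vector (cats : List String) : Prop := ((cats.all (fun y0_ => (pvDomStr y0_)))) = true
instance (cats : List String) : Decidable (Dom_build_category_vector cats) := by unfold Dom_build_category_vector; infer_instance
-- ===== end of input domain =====

-- B replaces the guarded forward pass with a different algorithm (backward overwrite pass
-- recording first positions, then sort-by-position ranking); return values agree with A everywhere.

-- ===== PORT A =====
-- A: one pass with a dict and a running counter, inserting unseen keys.
def build_category_vector (cats : List String) : List (String × Int) :=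
  (cats.foldl
    (fun (st : PySem.Dict String Int × Int) cat =>
      if st.1.contains cat then st else (st.1.insert cat st.2, st.2 + 1))
    (PySem.Dict.empty, 0)).1.items

-- ===== PORT B =====
-- B: first_pos built by a backward overwrite loop over reversed(list(enumerate(cats)));
-- order = sorted(first_pos, key=first_pos.get)  (every key is in the dict, so .get is ported
-- as getD with an unused default — exact on those keys); result = {c: i for i, c in enumerate(order)}.
def build_category_vector_alt (cats : List String) : List (String × Int) :=
  let first_pos := ((PySem.List.enumerate cats 0).reverse).foldl
      (fun (d : PySem.Dict String Int) p => d.insert p.2 p.1) PySem.Dict.empty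
  let order := PySem.List.sorted first_pos.keys (fun c => first_pos.getD c 0) false
  ((PySem.List.enumerate order 0).foldl
      (fun (d : PySem.Dict String Int) p => d.insert p.2 p.1) PySem.Dict.empty).items

-- ===== PRECONDITION & SPEC =====
def Spec_build_category_vector (cats : List String) (out : List (String × Int)) : Prop := out = build_category_vector_alt cats
instance (cats : List String) (out : List (String × Int)) : Decidable (Spec_build_category_vector cats out) := by unfold Spec_build_category_vector; infer_instance

-- ===== CLAIM (what is proved, stated in full; the proofs are below) =====
def Claim_equal_build_category_vector : Prop := ∀ (cats : List String), Dom_build_category_vector cats → Spec_build_category_vector cats (build_category_vector cats)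

-- ===== LEMMAS AND PROOFS =====

-- A-SIDE: the dict built after the seen-so-far distinct prefix s: items are (cat, index) pairs
def pvMkDict (s : List String) : PySem.Dict String Int :=
  PySem.Dict.mk ((PySem.List.enumerate s 0).map (fun p => (p.2, p.1)))

lemma pvMkDict_keys (s : List String) : (pvMkDict s).keys = s := by
  simp only [pvMkDict, PySem.Dict.keys, List.map_map]
  have hcomp : ((fun x : String × Int => x.1) ∘ fun p : Int × String => (p.2, p.1))
      = fun p : Int × String => p.2 := rfl
  rw [hcomp]
  exact PySem.List.map_snd_enumerate s 0

lemma pvMkDict_contains (s : List String) (cat : String) :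
    (pvMkDict s).contains cat = decide (cat ∈ s) := by
  rw [PySem.Dict.contains_eq_decide_mem_keys, pvMkDict_keys]

lemma pvMkDict_insert (s : List String) (cat : String) (h : cat ∉ s) :
    (pvMkDict s).insert cat (s.length : Int) = pvMkDict (s ++ [cat]) := by
  apply PySem.Dict.ext
  rw [PySem.Dict.items_insert_of_not_contains]
  · simp [pvMkDict, PySem.List.enumerate_append, PySem.List.enumerate_cons,
      PySem.List.enumerate_nil]
  · simp [pvMkDict_contains, h]

lemma pv_loop_inv (cats : List String) : ∀ (s : List String),
    (cats.foldl
      (fun (st : PySem.Dict String Int × Int) cat =>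
        if st.1.contains cat then st else (st.1.insert cat st.2, st.2 + 1))
      (pvMkDict s, (s.length : Int))).1
      = pvMkDict (PySem.Set.update s cats) := by
  induction cats with
  | nil => intro s; simp [PySem.Set.update]
  | cons cat cats ih =>
    intro s
    by_cases h : cat ∈ s
    · have hc : (pvMkDict s).contains cat = true := by simp [pvMkDict_contains, h]
      have hupd : PySem.Set.update s (cat :: cats) = PySem.Set.update s cats := by
        simp only [PySem.Set.update, List.foldl_cons, PySem.Set.add,
          (PySem.Set.contains_iff s cat).2 h, if_pos]
      simpa [List.foldl_cons, hc, hupd] using ih s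
    · have hc : (pvMkDict s).contains cat = false := by simp [pvMkDict_contains, h]
      have hupd : PySem.Set.update s (cat :: cats) = PySem.Set.update (s ++ [cat]) cats := by
        have : PySem.Set.add s cat = s ++ [cat] := by
          simp [PySem.Set.add]
          intro hcontains
          exact absurd hcontains h
        simp [PySem.Set.update, this]
      have hlen : (s.length : Int) + 1 = ((s ++ [cat]).length : Int) := by
        simp
      calc ((cat :: cats).foldl
            (fun (st : PySem.Dict String Int × Int) cat =>
              if st.1.contains cat then st else (st.1.insert cat st.2, st.2 + 1))
            (pvMkDict s, (s.length : Int))).1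
          = (cats.foldl
              (fun (st : PySem.Dict String Int × Int) cat =>
                if st.1.contains cat then st else (st.1.insert cat st.2, st.2 + 1))
              (pvMkDict (s ++ [cat]), ((s ++ [cat]).length : Int))).1 := by
            rw [List.foldl_cons]
            simp only [hc, if_neg Bool.false_ne_true, pvMkDict_insert s cat h, hlen]
        _ = pvMkDict (PySem.Set.update (s ++ [cat]) cats) := ih (s ++ [cat])
        _ = pvMkDict (PySem.Set.update s (cat :: cats)) := by rw [hupd]

-- A's result, in closed form
lemma pv_a_eq (cats : List String) :
    build_category_vector cats
      = (PySem.List.enumerate (PySem.List.dedup cats) 0).map (fun p => (p.2, p.1)) := by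
  unfold build_category_vector
  have h0 : pvMkDict [] = PySem.Dict.empty := rfl
  have := pv_loop_inv cats []
  rw [h0] at this
  simp only [List.length_nil, Int.natCast_zero] at this
  rw [this]
  have : PySem.Set.update ([] : List String) cats = PySem.List.dedup cats := by
    rw [PySem.List.dedup_eq_ofList, PySem.Set.ofList_eq_foldl]; rfl
  rw [this]
  simp [pvMkDict]

-- B-SIDE: the backward loop, rewritten as a foldr over the forward enumeration
def pvF (ps : List (Int × String)) : PySem.Dict String Int :=
  ps.foldr (fun p d => d.insert p.2 p.1) PySem.Dict.empty

lemma pvF_eq_rev_foldl (cats : List String) :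
    ((PySem.List.enumerate cats 0).reverse).foldl
      (fun (d : PySem.Dict String Int) p => d.insert p.2 p.1) PySem.Dict.empty
      = pvF (PySem.List.enumerate cats 0) := by
  rw [List.foldl_reverse]; rfl

lemma pvF_keys_nodup (cats : List String) (s : Int) :
    (pvF (PySem.List.enumerate cats s)).keys.Nodup := by
  induction cats generalizing s with
  | nil => simp [pvF, PySem.List.enumerate_nil, PySem.Dict.keys_empty]
  | cons h t ih =>
    rw [PySem.List.enumerate_cons]
    exact PySem.Dict.nodup_keys_insert _ _ _ (ih (s + 1))

lemma pvF_mem_keys (cats : List String) (s : Int) (c : String) :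
    c ∈ (pvF (PySem.List.enumerate cats s)).keys ↔ c ∈ cats := by
  induction cats generalizing s with
  | nil => simp [pvF, PySem.List.enumerate_nil, PySem.Dict.keys_empty]
  | cons h t ih =>
    rw [PySem.List.enumerate_cons]
    show c ∈ ((pvF (PySem.List.enumerate t (s + 1))).insert h s).keys ↔ _
    rw [PySem.Dict.mem_keys_insert, ih (s + 1)]
    simp

lemma pvF_getD (cats : List String) (s : Int) (c : String) (hc : c ∈ cats) :
    (pvF (PySem.List.enumerate cats s)).getD c 0 = s + (cats.idxOf c : Int) := by
  induction cats generalizing s with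
  | nil => cases hc
  | cons h t ih =>
    rw [PySem.List.enumerate_cons]
    show ((pvF (PySem.List.enumerate t (s + 1))).insert h s).getD c 0 = _
    by_cases hch : c = h
    · subst hch
      rw [PySem.Dict.getD_insert_self, List.idxOf_cons_self]
      simp
    · have hct : c ∈ t := by
        rcases List.mem_cons.1 hc with h' | h'
        · exact absurd h' hch
        · exact h'
      rw [PySem.Dict.getD_insert_of_ne _ _ _ hch, ih (s + 1) hct,
        List.idxOf_cons_ne t (fun e => hch e.symm)]
      push_cast
      ring

-- ordered dedup unfolds at a cons: the head, then the dedup of the tail with the head removed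
lemma pv_upd_skip (h : String) (l : List String) : ∀ (s : List String), h ∈ s →
    PySem.Set.update s l = PySem.Set.update s (l.filter (fun x => !(x == h))) := by
  induction l with
  | nil => intro s _; rfl
  | cons x l ih =>
    intro s hs
    by_cases hxh : x = h
    · subst hxh
      have : (PySem.Set.add s x) = s := by
        unfold PySem.Set.add
        rw [(PySem.Set.contains_iff s x).2 hs, if_pos rfl]
      simp only [PySem.Set.update, List.foldl_cons, this, List.filter_cons,
        beq_self_eq_true, Bool.not_true]
      exact ih s hs
    · have hmem : h ∈ PySem.Set.add s x := (PySem.Set.mem_add s x h).2 (Or.inl hs)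
      have hf : (!(x == h)) = true := by simp [hxh]
      simp only [PySem.Set.update, List.foldl_cons, List.filter_cons, hf, if_pos]
      exact ih (PySem.Set.add s x) hmem

lemma pv_upd_cons_out (h : String) : ∀ (l s : List String), h ∉ l →
    PySem.Set.update (h :: s) l = h :: PySem.Set.update s l := by
  intro l
  induction l with
  | nil => intro s _; rfl
  | cons x l ih =>
    intro s hx
    have hxh : x ≠ h := fun e => hx (by rw [e]; exact List.mem_cons_self ..)
    have hadd : PySem.Set.add (h :: s) x = h :: PySem.Set.add s x := by
      simp only [PySem.Set.add, PySem.Set.contains_eq_listContains, List.contains_cons]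
      rw [beq_eq_false_iff_ne.mpr hxh]
      simp only [Bool.false_or]
      split_ifs with hc <;> simp
    simp only [PySem.Set.update, List.foldl_cons, hadd]
    exact ih (PySem.Set.add s x) (fun hm => hx (List.mem_cons_of_mem x hm))

lemma pv_dedup_cons (h : String) (t : List String) :
    PySem.List.dedup (h :: t) = h :: PySem.List.dedup (t.filter (fun x => !(x == h))) := by
  have hofl : ∀ l : List String, PySem.List.dedup l = PySem.Set.update [] l := by
    intro l
    rw [PySem.List.dedup_eq_ofList, PySem.Set.ofList_eq_foldl]; rfl
  rw [hofl, hofl]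
  have h1 : PySem.Set.update ([] : List String) (h :: t) = PySem.Set.update [h] t := by
    simp [PySem.Set.update, PySem.Set.add]
  rw [h1, pv_upd_skip h t [h] (List.mem_singleton.2 rfl)]
  have hnot : h ∉ t.filter (fun x => !(x == h)) := by
    intro hm
    have := List.of_mem_filter hm
    simp at this
  exact pv_upd_cons_out h _ [] hnot

-- removing elements by a filter preserves the relative order of first occurrences
lemma pv_filter_idxOf_mono (p : String → Bool) (l : List String) (a b : String)
    (ha : a ∈ l.filter p) (hb : b ∈ l.filter p)
    (hlt : (l.filter p).idxOf a < (l.filter p).idxOf b) : l.idxOf a < l.idxOf b := by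
  induction l with
  | nil => cases ha
  | cons h t ih =>
    by_cases hp : p h
    · rw [List.filter_cons_of_pos hp] at ha hb hlt
      by_cases hah : a = h
      · subst hah
        have hbh : b ≠ a := by
          intro e; subst e; omega
        rw [List.idxOf_cons_self]
        rw [List.idxOf_cons_ne t (fun e => hbh e.symm)]
        omega
      · have hbh : b ≠ h := by
          intro e; subst e
          rw [List.idxOf_cons_self] at hlt; omega
        have ha' : a ∈ t.filter p := by
          rcases List.mem_cons.1 ha with h' | h'
          · exact absurd h' hah
          · exact h'
        have hb' : b ∈ t.filter p := by
          rcases List.mem_cons.1 hb with h' | h'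
          · exact absurd h' hbh
          · exact h'
        rw [List.idxOf_cons_ne _ (fun e => hah e.symm),
          List.idxOf_cons_ne _ (fun e => hbh e.symm)] at hlt ⊢
        have := ih ha' hb' (by omega)
        omega
    · rw [List.filter_cons_of_neg hp] at ha hb hlt
      have hah : a ≠ h := by
        intro e; subst e; exact hp (List.of_mem_filter ha)
      have hbh : b ≠ h := by
        intro e; subst e; exact hp (List.of_mem_filter hb)
      rw [List.idxOf_cons_ne _ (fun e => hah e.symm),
        List.idxOf_cons_ne _ (fun e => hbh e.symm)]
      have := ih ha hb hlt
      omega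

-- the ordered dedup lists categories in strictly increasing order of first position
lemma pv_dedup_pairwise : ∀ (cats : List String),
    (PySem.List.dedup cats).Pairwise (fun a b => cats.idxOf a < cats.idxOf b) := by
  intro cats
  induction hn : cats.length using Nat.strong_induction_on generalizing cats with
  | _ n ih =>
    cases cats with
    | nil => simp [PySem.List.dedup, PySem.Set.ofList, PySem.Set.empty]
    | cons h t =>
      rw [pv_dedup_cons]
      set ft := t.filter (fun x => !(x == h)) with hft
      have hlen : ft.length < n := by
        rw [hft]
        have := List.length_filter_le (fun x => !(x == h)) t
        simp only [← hn, List.length_cons]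
        omega
      have htail := ih ft.length hlen ft rfl
      constructor
      · intro b hb
        have hbft : b ∈ ft := (PySem.List.mem_dedup ft b).1 hb
        have hbh : b ≠ h := by
          intro e; subst e
          have := List.of_mem_filter hbft
          simp at this
        rw [List.idxOf_cons_self, List.idxOf_cons_ne t (fun e => hbh e.symm)]
        omega
      · refine List.Pairwise.imp_of_mem ?_ htail
        intro a b ha hb hab
        have ha' : a ∈ ft := (PySem.List.mem_dedup ft a).1 ha
        have hb' : b ∈ ft := (PySem.List.mem_dedup ft b).1 hb
        have hah : a ≠ h := by
          intro e; subst e; have := List.of_mem_filter ha'; simp at this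
        have hbh : b ≠ h := by
          intro e; subst e; have := List.of_mem_filter hb'; simp at this
        have := pv_filter_idxOf_mono _ t a b ha' hb' hab
        rw [List.idxOf_cons_ne t (fun e => hah e.symm),
          List.idxOf_cons_ne t (fun e => hbh e.symm)]
        omega

-- the sort by first position reproduces the ordered dedup
lemma pv_order_eq (cats : List String) :
    PySem.List.sorted (pvF (PySem.List.enumerate cats 0)).keys
      (fun c => (pvF (PySem.List.enumerate cats 0)).getD c 0) false
      = PySem.List.dedup cats := by
  apply PySem.List.sorted_eq_of_perm_of_pairwise_lt
  · rw [List.perm_ext_iff_of_nodup (PySem.List.nodup_dedup cats) (pvF_keys_nodup cats 0)]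
    intro c
    rw [pvF_mem_keys cats 0 c, PySem.List.mem_dedup]
  · refine List.Pairwise.imp_of_mem ?_ (pv_dedup_pairwise cats)
    intro a b ha hb hab
    have ha' : a ∈ cats := (PySem.List.mem_dedup cats a).1 ha
    have hb' : b ∈ cats := (PySem.List.mem_dedup cats b).1 hb
    rw [pvF_getD cats 0 a ha', pvF_getD cats 0 b hb']
    omega

-- B's result, in the same closed form
lemma pv_b_eq (cats : List String) :
    build_category_vector_alt cats
      = (PySem.List.enumerate (PySem.List.dedup cats) 0).map (fun p => (p.2, p.1)) := by
  unfold build_category_vector_alt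
  simp only [pvF_eq_rev_foldl, pv_order_eq]
  have h := PySem.Dict.items_foldl_insert_fresh
      (l := PySem.List.enumerate (PySem.List.dedup cats) 0)
      (k := Prod.snd) (v := Prod.fst) (d := PySem.Dict.empty)
      (by intro a _; exact PySem.Dict.contains_empty _)
      (by rw [PySem.List.map_snd_enumerate]; exact PySem.List.nodup_dedup cats)
  simpa using h

-- ===== VERDICT (by name: the statement is the Claim_ definition above) =====
theorem build_category_vector_spec : Claim_equal_build_category_vector := by
  intro cats _
  show build_category_vector cats = build_category_vector_alt cats
  rw [pv_a_eq, pv_b_eq]
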